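-- pv_equiv track=rewrite | github.com/tommytang2414/exam-quiz | parse_v2.py | find_in_options
-- ===== SOURCE A (Python) =====
-- def find_in_options(phrase: str, options_raw: str) -> str | None:
--     """
--     Find phrase in options_raw with proper word boundaries.
--     Returns the matched text in original case (including a trailing period if
--     the option ends with one), or None if not found.
--
--     End boundary: space, period, comma, closing paren, or end of string.
--     The period is included in the returned text when present — this is important
--     for sentence-style options like "Yes, there could be." where the explanation
--     drops the terminal period when splitting on '.'.
--     """
--     opts_lower = options_raw.lower()
--     phrase_lower = phrase.lower()
--     pos = 0
--     while pos < len(opts_lower):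
--         idx = opts_lower.find(phrase_lower, pos)
--         if idx < 0:
--             break
--         before_ok = (idx == 0 or opts_lower[idx - 1] == ' ')
--         end_idx = idx + len(phrase)
--         after_char = opts_lower[end_idx] if end_idx < len(opts_lower) else ''
--         after_ok = (after_char == '' or after_char in ' .,)')
--         if before_ok and after_ok:
--             # Include a trailing period in the returned text so the 'after'
--             # chunk starts cleanly at the next option.
--             actual_end = end_idx + (1 if after_char == '.' else 0)
--             return options_raw[idx:actual_end].strip()
--         pos = idx + 1
--     return None
-- ===== SOURCE B (Python) =====
-- def find_in_options(phrase: str, options_raw: str) -> str | None: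
--     """Rabin-Karp re-implementation: one rolling-hash pass over the lowered
--     options string; at each window whose polynomial hash (mod a Mersenne
--     prime) equals the phrase hash, check the word boundaries (start of string
--     / after a space; end at space, period, comma, closing paren or end of
--     string), confirm the window, and return the original-case slice (plus a
--     trailing period) stripped."""
--     opts = options_raw.lower()
--     pat = phrase.lower()
--     n, m = len(opts), len(pat)
--     if m > n:
--         return None
--     BASE = 1000003
--     MOD = (1 << 61) - 1
--     target = 0
--     for c in pat:
--         target = (target * BASE + ord(c)) % MOD
--     h = 0
--     for c in opts[:m]:
--         h = (h * BASE + ord(c)) % MOD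
--     shift = pow(BASE, m - 1, MOD) if m else 1
--     for i in range(n - m + 1):
--         if h == target and (i == 0 or opts[i - 1] == ' '):
--             after = opts[i + m] if i + m < n else ''
--             if after == '' or after in ' .,)':
--                 if opts[i:i + m] == pat:  # confirm the window (rules out collisions)
--                     end = i + m + (1 if after == '.' else 0)
--                     return options_raw[i:end].strip()
--         if i + m < n:
--             h = ((h - ord(opts[i]) * shift) * BASE + ord(opts[i + m])) % MOD
--     return None
-- ===== Notes on version B (the rewrite author's own statement) =====
-- stated objective: alternative
-- what changed: B replaces A's repeated str.find()-then-recheck-boundaries loop with a Rabin-Karp scan: one pass maintains an exact polynomial rolling hash of the current window and only boundary-checks and confirms windows whose hash equals the phrase hash.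
-- outside the precondition, e.g. on find_in_options('', 'x .'): A returns '.', B returns None
import Mathlib
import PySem

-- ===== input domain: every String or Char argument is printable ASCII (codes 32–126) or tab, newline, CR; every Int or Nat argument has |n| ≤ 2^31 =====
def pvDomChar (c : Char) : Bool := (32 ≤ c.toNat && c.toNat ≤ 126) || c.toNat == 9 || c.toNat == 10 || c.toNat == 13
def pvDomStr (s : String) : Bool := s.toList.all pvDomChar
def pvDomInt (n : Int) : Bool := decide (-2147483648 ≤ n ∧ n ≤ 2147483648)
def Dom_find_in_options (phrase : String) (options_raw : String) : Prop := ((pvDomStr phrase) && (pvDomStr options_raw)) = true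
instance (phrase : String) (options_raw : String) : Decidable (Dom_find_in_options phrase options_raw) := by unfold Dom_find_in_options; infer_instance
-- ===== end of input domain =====

-- B replaces A's find()-and-recheck loop with a Rabin–Karp rolling-hash scan (alternative algorithm, same asymptotic cost).

-- ===== PORT A =====
-- A's while-loop: pos advances to idx+1 after each failed occurrence; totalized with
-- fuel = len+1, which the proofs show is never exhausted (pos strictly increases, bounded by len).
def pvFindLoopA (O OL PL : List Char) (plen pos : Nat) : Nat → Option (List Char)
  | 0 => none
  | fuel + 1 =>
    if pos < OL.length then
      let idx := PySem.Chars.findFrom OL PL (pos : Int) none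
      if idx < 0 then none
      else
        let i := idx.toNat
        let before_ok := i == 0 || PySem.List.pyGet? OL ((i : Int) - 1) == some ' '
        let end_idx := i + plen
        let after : Option Char := PySem.List.pyGet? OL ((end_idx : Nat) : Int)  -- none plays Python's '' (end_idx ≥ len)
        let after_ok := after == none || after == some ' ' || after == some '.' || after == some ',' || after == some ')'
        if before_ok && after_ok then
          some (PySem.Chars.strip (PySem.List.slice O (some (i : Int)) (some ((end_idx + (if after == some '.' then 1 else 0) : Nat) : Int))))
        else pvFindLoopA O OL PL plen (i + 1) fuel
    else none

def find_in_options (phrase : String) (options_raw : String) : Option String :=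
  let O := options_raw.toList
  let OL := PySem.Chars.lower O
  let PL := PySem.Chars.lower phrase.toList
  (pvFindLoopA O OL PL phrase.toList.length 0 (OL.length + 1)).map String.ofList

-- ===== PORT B =====
-- Source B: Rabin–Karp with BASE = 1000003 and MOD = 2^61 - 1 (pvM).
def pvM : Int := 2305843009213693951

-- Source B's `h = (h * BASE + ord(c)) % MOD` fold (Python's % on a positive modulus is emod).
def pvHashM (l : List Char) : Int := l.foldl (fun h c => PySem.Int.mod (h * 1000003 + (c.toNat : Int)) pvM) 0

-- The body of Source B's candidate test at i (hash equal, start boundary, end boundary,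
-- window confirmation); `none` plays Python's fall-through to the hash update.
def pvRKHit (O OL PL : List Char) (m : Nat) (target : Int) (i : Nat) (h : Int) : Option (List Char) :=
  if h == target && (i == 0 || PySem.List.pyGet? OL ((i : Int) - 1) == some ' ') then
    let after := PySem.List.pyGet? OL ((i + m : Nat) : Int)  -- none plays Python's '' (i+m ≥ len)
    if after == none || after == some ' ' || after == some '.' || after == some ',' || after == some ')' then
      if PySem.List.slice OL (some (i : Int)) (some ((i + m : Nat) : Int)) == PL then
        some (PySem.Chars.strip (PySem.List.slice O (some (i : Int)) (some ((i + m + (if after == some '.' then 1 else 0) : Nat) : Int))))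
      else none
    else none
  else none

-- Source B's `if i + m < n: h = (h - ord(opts[i]) * shift) * BASE + ord(opts[i + m])`
-- (both indices are in range there; getD is never the default — see pvRKNext_inv below).
def pvRKNext (OL : List Char) (m : Nat) (shift : Int) (i : Nat) (h : Int) : Int :=
  if i + m < OL.length then
    PySem.Int.mod ((h - ((PySem.List.pyGet? OL ((i : Nat) : Int)).getD ' ').toNat * shift) * 1000003
      + ((PySem.List.pyGet? OL ((i + m : Nat) : Int)).getD ' ').toNat) pvM
  else h

-- Source B's `for i in range(n - m + 1)` loop, as structural recursion on i.
def pvRKLoop (O OL PL : List Char) (m : Nat) (target shift : Int) (i : Nat) (h : Int) : Option (List Char) :=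
  if i < OL.length - m + 1 then
    match pvRKHit O OL PL m target i h with
    | some r => some r
    | none => pvRKLoop O OL PL m target shift (i + 1) (pvRKNext OL m shift i h)
  else none
termination_by OL.length + 1 - i
decreasing_by omega

def find_in_options_alt (phrase : String) (options_raw : String) : Option String :=
  let O := options_raw.toList
  let OL := PySem.Chars.lower O
  let PL := PySem.Chars.lower phrase.toList
  if PL.length > OL.length then none
  else
    let target := pvHashM PL
    let h0 := pvHashM (PySem.List.slice OL none (some (PL.length : Int)))  -- opts[:m]
    -- pow(BASE, m - 1, MOD) ported as the modular power it computes
    let shift : Int := if PL.length ≠ 0 then PySem.Int.mod ((1000003 : Int) ^ (PL.length - 1)) pvM else 1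
    (pvRKLoop O OL PL PL.length target shift 0 h0).map String.ofList

-- ===== PRECONDITION & SPEC =====
-- Pre_ excludes only the empty phrase: whether (and at which positions, including end-of-string)
-- the empty string 'occurs' at a word boundary is an accidental corner of A's find-loop that no
-- caller would specify, and B's rolling-hash scan resolves it differently.
def Pre_find_in_options (phrase : String) (options_raw : String) : Prop := phrase ≠ ""
instance (phrase : String) (options_raw : String) : Decidable (Pre_find_in_options phrase options_raw) := by unfold Pre_find_in_options; infer_instance
def pvWitness_find_in_options : String × String := ("cat", "a cat sat")

def Spec_find_in_options (phrase : String) (options_raw : String) (out : Option String) : Prop := out = find_in_options_alt phrase options_raw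
instance (phrase : String) (options_raw : String) (out : Option String) : Decidable (Spec_find_in_options phrase options_raw out) := by unfold Spec_find_in_options; infer_instance

-- ===== CLAIM (what is proved, stated in full; the proofs are below) =====
def Claim_equal_find_in_options : Prop := ∀ (phrase : String) (options_raw : String), Dom_find_in_options phrase options_raw → Pre_find_in_options phrase options_raw → Spec_find_in_options phrase options_raw (find_in_options phrase options_raw)

-- ===== LEMMAS AND PROOFS =====

-- the un-modded polynomial hash (proof-side only)
def pvHashC (l : List Char) : Int := l.foldl (fun h c => h * 1000003 + (c.toNat : Int)) 0

-- hash of the length-m window of OL starting at i, as Source B maintains it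
def pvHashWin (OL : List Char) (m i : Nat) : Int := pvHashM ((OL.drop i).take m)

-- the condition under which both programs accept position i
def pvP (OL PL : List Char) (m i : Nat) : Prop :=
  PL <+: OL.drop i ∧
  (i = 0 ∨ PySem.List.pyGet? OL ((i : Int) - 1) = some ' ') ∧
  (PySem.List.pyGet? OL ((i + m : Nat) : Int) = none ∨
   PySem.List.pyGet? OL ((i + m : Nat) : Int) = some ' ' ∨
   PySem.List.pyGet? OL ((i + m : Nat) : Int) = some '.' ∨
   PySem.List.pyGet? OL ((i + m : Nat) : Int) = some ',' ∨
   PySem.List.pyGet? OL ((i + m : Nat) : Int) = some ')')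

lemma pvHash_shift (l : List Char) (h : Int) :
    l.foldl (fun h c => h * 1000003 + (c.toNat : Int)) h = h * 1000003 ^ l.length + pvHashC l := by
  induction l generalizing h with
  | nil => simp [pvHashC]
  | cons c t ih =>
    have h2 : pvHashC (c :: t) = ((c.toNat : Int)) * 1000003 ^ t.length + pvHashC t := by
      have := ih (0 * 1000003 + (c.toNat : Int))
      simpa [pvHashC] using this
    simp only [List.foldl_cons, List.length_cons]
    rw [ih, h2, pow_succ]
    ring

lemma pvHashC_cons (c : Char) (l : List Char) :
    pvHashC (c :: l) = (c.toNat : Int) * 1000003 ^ l.length + pvHashC l := by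
  have := pvHash_shift l (0 * 1000003 + (c.toNat : Int))
  simpa [pvHashC] using this

lemma pvHashC_snoc (l : List Char) (c : Char) :
    pvHashC (l ++ [c]) = pvHashC l * 1000003 + (c.toNat : Int) := by
  simp [pvHashC, List.foldl_append]

lemma pvSlice_eq (OL : List Char) (i m : Nat) :
    PySem.List.slice OL (some (i : Int)) (some ((i + m : Nat) : Int)) = (OL.drop i).take m := by
  have := PySem.List.slice_natCast OL i (i + m)
  simpa using this

lemma pvHashC_slide (OL : List Char) (m i : Nat) (hm : 0 < m) (hin : i + m < OL.length) :
    (pvHashC ((OL.drop i).take m) - ((OL[i]'(by omega)).toNat : Int) * 1000003 ^ (m - 1)) * 1000003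
      + ((OL[i + m]'hin).toNat : Int) = pvHashC ((OL.drop (i + 1)).take m) := by
  have hi : i < OL.length := by omega
  have h1 : (OL.drop i).take m = OL[i] :: ((OL.drop (i + 1)).take (m - 1)) := by
    rw [List.drop_eq_getElem_cons hi, show m = (m - 1) + 1 from by omega, List.take_succ_cons]
    simp
  have hlen : ((OL.drop (i + 1)).take (m - 1)).length = m - 1 := by
    simp [List.length_take, List.length_drop]; omega
  have h2 : (OL.drop (i + 1)).take m = ((OL.drop (i + 1)).take (m - 1)) ++ [OL[i + m]] := by
    have hg : (OL.drop (i + 1))[m - 1]? = some OL[i + m] := by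
      rw [List.getElem?_drop]
      rw [show i + 1 + (m - 1) = i + m from by omega]
      exact List.getElem?_eq_getElem hin
    conv_lhs => rw [show m = (m - 1) + 1 from by omega, List.take_add_one, hg]
    rfl
  rw [h1, pvHashC_cons, hlen, h2, pvHashC_snoc]
  ring

lemma pvM_pos : (0 : Int) < pvM := by norm_num [pvM]

lemma pvHash_cong (l : List Char) (h1 h2 : Int) (hmod : h1 % pvM = h2 % pvM) :
    (l.foldl (fun h c => h * 1000003 + (c.toNat : Int)) h1) % pvM
      = (l.foldl (fun h c => h * 1000003 + (c.toNat : Int)) h2) % pvM := by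
  induction l generalizing h1 h2 with
  | nil => simpa using hmod
  | cons c t ih =>
    simp only [List.foldl_cons]
    exact ih _ _ (((Int.ModEq.mul_right 1000003 hmod).add_right (c.toNat : Int)))

lemma pvHashM_aux (l : List Char) (h : Int) (hh : h % pvM = h) :
    l.foldl (fun h c => PySem.Int.mod (h * 1000003 + (c.toNat : Int)) pvM) h
      = (l.foldl (fun h c => h * 1000003 + (c.toNat : Int)) h) % pvM := by
  induction l generalizing h with
  | nil => simpa using hh.symm
  | cons c t ih =>
    simp only [List.foldl_cons]
    rw [PySem.Int.mod_eq_emod_of_pos pvM_pos]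
    rw [ih _ (Int.emod_emod_of_dvd _ (dvd_refl pvM))]
    exact pvHash_cong t _ _ (Int.emod_emod_of_dvd _ (dvd_refl pvM))

lemma pvHashM_eq (l : List Char) : pvHashM l = pvHashC l % pvM := by
  unfold pvHashM pvHashC
  exact pvHashM_aux l 0 (by norm_num)

lemma pvRKHit_none (O OL PL : List Char) (m : Nat) (target : Int) (i : Nat) (h : Int)
    (hm : m = PL.length) (hnP : ¬ pvP OL PL m i) :
    pvRKHit O OL PL m target i h = none := by
  by_cases h3 : (PySem.List.slice OL (some (i : Int)) (some ((i + m : Nat) : Int)) == PL) = true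
  · by_cases h1 : (h == target && (i == 0 || PySem.List.pyGet? OL ((i : Int) - 1) == some ' ')) = true
    · by_cases h2 : (PySem.List.pyGet? OL ((i + m : Nat) : Int) == none
          || PySem.List.pyGet? OL ((i + m : Nat) : Int) == some ' '
          || PySem.List.pyGet? OL ((i + m : Nat) : Int) == some '.'
          || PySem.List.pyGet? OL ((i + m : Nat) : Int) == some ','
          || PySem.List.pyGet? OL ((i + m : Nat) : Int) == some ')') = true
      · exfalso
        apply hnP
        refine ⟨?_, ?_, ?_⟩
        · rw [pvSlice_eq] at h3
          rw [List.prefix_iff_eq_take, ← hm]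
          exact (beq_iff_eq.mp h3).symm
        · rw [Bool.and_eq_true] at h1
          have := h1.2
          simp only [Bool.or_eq_true, beq_iff_eq] at this
          tauto
        · simp only [Bool.or_eq_true, beq_iff_eq] at h2
          tauto
      · push_cast at h2
        simp only [Bool.or_eq_true, beq_iff_eq, not_or] at h2
        simp only [pvRKHit]
        simp [h1]
        tauto
    · simp [pvRKHit, h1]
  · push_cast at h3
    simp only [beq_iff_eq] at h3
    simp [pvRKHit]
    tauto

lemma pvRKHit_some (O OL PL : List Char) (m : Nat) (i : Nat) (h : Int)
    (hm : m = PL.length) (hInv : h = pvHashWin OL m i) (hP : pvP OL PL m i) :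
    pvRKHit O OL PL m (pvHashM PL) i h =
      some (PySem.Chars.strip (PySem.List.slice O (some (i : Int))
        (some ((i + m + (if PySem.List.pyGet? OL ((i + m : Nat) : Int) == some '.' then 1 else 0) : Nat) : Int)))) := by
  obtain ⟨hpre, hbef, haft⟩ := hP
  have hwin : (OL.drop i).take m = PL := by
    rw [hm]; exact (List.prefix_iff_eq_take.mp hpre).symm
  have hhash : (h == pvHashM PL) = true := by
    rw [beq_iff_eq, hInv]; unfold pvHashWin; rw [hwin]
  have hbef' : ((i == 0 || PySem.List.pyGet? OL ((i : Int) - 1) == some ' ')) = true := by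
    simp only [Bool.or_eq_true, beq_iff_eq]
    rcases hbef with hh | hh
    · exact Or.inl (by omega)
    · exact Or.inr hh
  have haft' : (PySem.List.pyGet? OL ((i + m : Nat) : Int) == none
      || PySem.List.pyGet? OL ((i + m : Nat) : Int) == some ' '
      || PySem.List.pyGet? OL ((i + m : Nat) : Int) == some '.'
      || PySem.List.pyGet? OL ((i + m : Nat) : Int) == some ','
      || PySem.List.pyGet? OL ((i + m : Nat) : Int) == some ')') = true := by
    simp only [Bool.or_eq_true, beq_iff_eq]
    tauto
  have hver : (PySem.List.slice OL (some (i : Int)) (some ((i + m : Nat) : Int)) == PL) = true := by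
    rw [beq_iff_eq, pvSlice_eq]; exact hwin
  push_cast at haft' hver
  simp only [Bool.or_eq_true, beq_iff_eq] at haft' hver
  simp [pvRKHit, hhash, hbef']
  tauto

lemma pvRKNext_inv (OL : List Char) (m : Nat) (i : Nat) (h : Int)
    (hm : 0 < m) (hin : i + m < OL.length) (hInv : h = pvHashWin OL m i) :
    pvRKNext OL m (PySem.Int.mod ((1000003 : Int) ^ (m - 1)) pvM) i h = pvHashWin OL m (i + 1) := by
  have hi : i < OL.length := by omega
  unfold pvRKNext
  rw [if_pos hin]
  have g1 : PySem.List.pyGet? OL ((i : Nat) : Int) = some (OL[i]'hi) := by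
    rw [PySem.List.pyGet?_natCast]; exact List.getElem?_eq_getElem hi
  have g2 : PySem.List.pyGet? OL ((i + m : Nat) : Int) = some (OL[i + m]'hin) := by
    rw [PySem.List.pyGet?_natCast]; exact List.getElem?_eq_getElem hin
  rw [g1, g2, hInv]
  simp only [Option.getD_some]
  rw [PySem.Int.mod_eq_emod_of_pos pvM_pos, PySem.Int.mod_eq_emod_of_pos pvM_pos]
  unfold pvHashWin
  rw [pvHashM_eq, pvHashM_eq]
  have hme : ((pvHashC ((OL.drop i).take m) % pvM
        - ((OL[i]'hi).toNat : Int) * ((1000003 : Int) ^ (m - 1) % pvM)) * 1000003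
        + ((OL[i + m]'hin).toNat : Int)) % pvM
      = ((pvHashC ((OL.drop i).take m)
        - ((OL[i]'hi).toNat : Int) * ((1000003 : Int) ^ (m - 1))) * 1000003
        + ((OL[i + m]'hin).toNat : Int)) % pvM := by
    have e1 : pvHashC ((OL.drop i).take m) % pvM ≡ pvHashC ((OL.drop i).take m) [ZMOD pvM] :=
      Int.emod_emod_of_dvd _ (dvd_refl pvM)
    have e2 : (1000003 : Int) ^ (m - 1) % pvM ≡ (1000003 : Int) ^ (m - 1) [ZMOD pvM] :=
      Int.emod_emod_of_dvd _ (dvd_refl pvM)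
    exact ((e1.sub (e2.mul_left _)).mul_right 1000003).add_right _
  rw [hme, pvHashC_slide OL m i hm hin]

-- If PL occurs nowhere at or after pos, B's loop from pos returns none (no invariant needed:
-- acceptance always confirms the window).
lemma pvRKLoop_none (O OL PL : List Char) (m : Nat) (target shift : Int) (pos : Nat) (h : Int)
    (hm : m = PL.length) (hno : ∀ i, pos ≤ i → ¬ PL <+: OL.drop i) :
    pvRKLoop O OL PL m target shift pos h = none := by
  rw [pvRKLoop]
  split
  · rw [pvRKHit_none O OL PL m target pos h hm (fun hP => hno pos le_rfl hP.1)]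
    exact pvRKLoop_none O OL PL m target shift (pos + 1) _ hm (fun i hi => hno i (by omega))
  · rfl
termination_by OL.length + 1 - pos
decreasing_by omega

-- No occurrence in [pos, q): B's loop slides from pos to q, maintaining the window hash.
lemma pvRKLoop_skip (O OL PL : List Char) (m : Nat) (target : Int) (pos q : Nat) (h : Int)
    (hm : m = PL.length) (hm0 : 0 < m)
    (hpq : pos ≤ q) (hq : q ≤ OL.length - m) (hmn : m ≤ OL.length)
    (hInv : h = pvHashWin OL m pos)
    (hno : ∀ i, pos ≤ i → i < q → ¬ PL <+: OL.drop i) :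
    pvRKLoop O OL PL m target (PySem.Int.mod ((1000003 : Int) ^ (m - 1)) pvM) pos h =
    pvRKLoop O OL PL m target (PySem.Int.mod ((1000003 : Int) ^ (m - 1)) pvM) q (pvHashWin OL m q) := by
  by_cases hlt : pos < q
  · have hin : pos + m < OL.length := by omega
    rw [pvRKLoop]
    rw [if_pos (by omega)]
    rw [pvRKHit_none O OL PL m target pos h hm (fun hP => hno pos le_rfl hlt hP.1)]
    rw [pvRKNext_inv OL m pos h hm0 hin hInv]
    exact pvRKLoop_skip O OL PL m target (pos + 1) q _ hm hm0 (by omega) hq hmn rfl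
      (fun i h1 h2 => hno i (by omega) h2)
  · have hpos : pos = q := by omega
    subst hpos
    rw [hInv]
termination_by q - pos
decreasing_by omega

-- Main loop equivalence: with enough fuel and the rolling-hash invariant,
-- A's find-loop from pos equals B's Rabin–Karp loop from pos.
lemma pv_loop_eqRK (O OL PL : List Char) (plen pos fuel : Nat) (h : Int)
    (hm : plen = PL.length) (hm0 : 0 < PL.length) (hmn : PL.length ≤ OL.length)
    (hfuel : OL.length - pos < fuel)
    (hInv : pos ≤ OL.length - PL.length → h = pvHashWin OL PL.length pos) :
    pvFindLoopA O OL PL plen pos fuel =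
    pvRKLoop O OL PL PL.length (pvHashM PL) (PySem.Int.mod ((1000003 : Int) ^ (PL.length - 1)) pvM) pos h := by
  subst hm
  cases fuel with
  | zero => omega
  | succ f =>
    rw [pvFindLoopA]
    by_cases hp : pos < OL.length
    · simp only [if_pos hp]
      by_cases hneg : PySem.Chars.findFrom OL PL (pos : Int) none < 0
      · simp only [if_pos hneg]
        have hf := PySem.Chars.findFrom_natCast OL PL pos (le_of_lt hp)
        by_cases hfind : PySem.Chars.find (OL.drop pos) PL = -1
        · have hnoin : ¬ PL <:+: OL.drop pos := (PySem.Chars.find_eq_neg_one_iff _ _).mp hfind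
          refine (pvRKLoop_none O OL PL PL.length _ _ pos h rfl ?_).symm
          intro i hi hpre
          apply hnoin
          rw [List.infix_iff_prefix_suffix]
          refine ⟨OL.drop i, hpre, ?_⟩
          rw [show OL.drop i = (OL.drop pos).drop (i - pos) from by
            rw [List.drop_drop]; congr 1; omega]
          exact List.drop_suffix _ _
        · exfalso
          rw [hf, if_neg hfind] at hneg
          have h1 := PySem.Chars.neg_one_le_find (OL.drop pos) PL
          omega
      · simp only [if_neg hneg]
        have hspec := PySem.Chars.findFrom_natCast_spec OL PL pos (le_of_lt hp) (by omega)
        obtain ⟨hposle, hpre, hmin⟩ := hspec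
        set idx := (PySem.Chars.findFrom OL PL (pos : Int) none).toNat with hidx
        have hlenle : PL.length ≤ (OL.drop idx).length := hpre.length_le
        rw [List.length_drop] at hlenle
        have hidxle : idx ≤ OL.length - PL.length := by omega
        have hposle' : pos ≤ idx := by
          simp only [hidx]
          omega
        have hInv' : h = pvHashWin OL PL.length pos := hInv (by omega)
        rw [pvRKLoop_skip O OL PL PL.length _ pos idx h rfl hm0 hposle' hidxle hmn hInv'
          (fun i h1 h2 => hmin i h1 h2)]
        rw [pvRKLoop, if_pos (show idx < OL.length - PL.length + 1 by omega)]
        split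
        · next hguard =>
          rw [Bool.and_eq_true] at hguard
          have hP : pvP OL PL PL.length idx := by
            refine ⟨hpre, ?_, ?_⟩
            · have := hguard.1
              simp only [Bool.or_eq_true, beq_iff_eq] at this
              rcases this with hh | hh
              · exact Or.inl (by omega)
              · exact Or.inr hh
            · have := hguard.2
              simp only [Bool.or_eq_true, beq_iff_eq] at this
              tauto
          rw [pvRKHit_some O OL PL PL.length idx _ rfl rfl hP]
        · next hguard =>
          have hnP : ¬ pvP OL PL PL.length idx := by
            intro hP
            apply hguard
            obtain ⟨_, hbef, haft⟩ := hP
            rw [Bool.and_eq_true]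
            constructor
            · simp only [Bool.or_eq_true, beq_iff_eq]
              rcases hbef with hh | hh
              · exact Or.inl (by omega)
              · exact Or.inr hh
            · simp only [Bool.or_eq_true, beq_iff_eq]
              tauto
          rw [pvRKHit_none O OL PL PL.length _ idx _ rfl hnP]
          exact pv_loop_eqRK O OL PL PL.length (idx + 1) f _ rfl hm0 hmn (by omega)
            (fun hle => pvRKNext_inv OL PL.length idx _ hm0 (by omega) rfl)
    · have hout : ¬ pos < OL.length - PL.length + 1 := by omega
      rw [pvRKLoop, if_neg hout]
      simp [hp]
termination_by fuel
decreasing_by omega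

-- A returns none when PL cannot occur in OL at all (used for the m > n case).
lemma pvFindLoopA_none_of_long (O OL PL : List Char) (plen pos fuel : Nat)
    (hlong : OL.length < PL.length) :
    pvFindLoopA O OL PL plen pos fuel = none := by
  cases fuel with
  | zero => rfl
  | succ f =>
    rw [pvFindLoopA]
    by_cases hp : pos < OL.length
    · simp only [if_pos hp]
      have hfind : PySem.Chars.find (OL.drop pos) PL = -1 := by
        rw [PySem.Chars.find_eq_neg_one_iff]
        intro hin
        have := hin.length_le
        rw [List.length_drop] at this
        omega
      have hf := PySem.Chars.findFrom_natCast OL PL pos (le_of_lt hp)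
      rw [hf, if_pos hfind]
      simp
    · simp [hp]

-- ===== VERDICT (by name: the statement is the Claim_ definition above) =====
theorem find_in_options_spec : Claim_equal_find_in_options := by
  intro phrase options_raw _ hpre
  unfold Spec_find_in_options find_in_options find_in_options_alt
  have hlen : phrase.toList.length = (PySem.Chars.lower phrase.toList).length := by
    simp [PySem.Chars.lower]
  have hpre' : phrase ≠ "" := hpre
  have hne : phrase.toList ≠ [] := by
    simp [hpre']
  have hm0 : 0 < (PySem.Chars.lower phrase.toList).length := by
    rw [← hlen]
    exact List.length_pos_of_ne_nil hne
  by_cases hgt : (PySem.Chars.lower phrase.toList).length > (PySem.Chars.lower options_raw.toList).length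
  · simp only [if_pos hgt]
    rw [pvFindLoopA_none_of_long _ _ _ _ _ _ hgt]
    rfl
  · simp only [if_neg hgt]
    rw [not_lt] at hgt
    rw [if_pos (show (PySem.Chars.lower phrase.toList).length ≠ 0 from by omega)]
    refine congrArg (Option.map String.ofList) ?_
    rw [pv_loop_eqRK _ _ _ _ 0 _ _ hlen hm0 hgt (by omega) ?_]
    intro _
    unfold pvHashWin
    rw [PySem.List.slice_to_natCast, List.drop_zero]
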